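-- pv_equiv track=rewrite | github.com/vncloudsco/splunk | lib/python3.7/site-packages/splunk/rcDisplay.py | wrap_truncate
-- ===== SOURCE A (Python) =====
-- def wrap_truncate(text, width):
--     sublines = text.split('\n')
--
--     tlines = []
--     for line in sublines:
--         if len(line) > width:
--             tlines.append("%s..." % line[0:width])
--         else:
--             tlines.append(line)
--
--     return "\n".join(tlines)
-- ===== SOURCE B (Python) =====
-- def wrap_truncate(text, width):
--     # Single streaming pass over characters with a column counter:
--     # characters past the width are dropped as they stream by, and the
--     # ellipsis is decided at each line boundary. No line list is built.
--     out = []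
--     col = 0
--     for c in text:
--         if c == '\n':
--             if col > width:
--                 out.append('...')
--             out.append('\n')
--             col = 0
--         else:
--             if col < width:
--                 out.append(c)
--             col += 1
--     if col > width:
--         out.append('...')
--     return ''.join(out)
-- ===== Notes on version B (the rewrite author's own statement) =====
-- stated objective: alternative
-- what changed: Replaced split('\n')/per-line truncate/join with a single streaming character pass keeping only a column counter: characters beyond the width are dropped as they stream by and the ellipsis is emitted at each line boundary, so no line list is ever built.
-- intended difference: For negative widths on a text containing a line longer than |width|, A's slice line[0:width] keeps all but the last |width| characters before the '...' (an accident of Python negative-slice semantics), while B truncates to zero kept characters and returns '...' per over-long line, the intended behaviour of a truncation width clamped at 0. — e.g. on wrap_truncate("ab", -1): A returns "a...", B returns "..."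
import Mathlib
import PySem

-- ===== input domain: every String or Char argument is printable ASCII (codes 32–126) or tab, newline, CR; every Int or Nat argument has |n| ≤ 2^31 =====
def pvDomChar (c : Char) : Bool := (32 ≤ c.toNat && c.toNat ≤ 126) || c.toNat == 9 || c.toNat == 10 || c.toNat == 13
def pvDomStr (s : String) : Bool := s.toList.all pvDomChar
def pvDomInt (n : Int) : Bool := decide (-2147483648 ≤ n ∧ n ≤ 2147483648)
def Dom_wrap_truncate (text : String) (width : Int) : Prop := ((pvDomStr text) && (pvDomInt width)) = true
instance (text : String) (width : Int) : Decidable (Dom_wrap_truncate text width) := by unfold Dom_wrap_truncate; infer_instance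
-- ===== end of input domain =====

-- B replaces A's split('\n')/per-line truncate/join by a single streaming pass over the characters
-- with a column counter (no line list is built); objective: alternative, same cost.

-- ===== PORT A =====
-- A, step for step on the char-list side (PySem convention: string ops are defined over List Char):
-- sublines = text.split('\n'); loop appending either the truncated or the untouched line; '\n'.join.
def wrapTruncateA (cs : List Char) (width : Int) : List Char :=
  let sublines := PySem.Chars.splitOn cs ['\n']
  let tlines := sublines.foldl (fun acc line =>
    if (PySem.Chars.len line) > width then
      acc ++ [PySem.Chars.slice line (some 0) (some width) ++ "...".toList]
    else
      acc ++ [line]) []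
  PySem.Chars.join ['\n'] tlines

def wrap_truncate (text : String) (width : Int) : String :=
  String.ofList (wrapTruncateA text.toList width)

-- ===== PORT B =====
-- Source B's loop body: on '\n' flush the pending ellipsis (if the line overflowed) and the newline,
-- resetting the column; otherwise keep the character only while the column is still below width.
def wrapTruncateBStep (width : Int) (st : List Char × Int) (c : Char) : List Char × Int :=
  if c = '\n' then
    ((if st.2 > width then st.1 ++ "...".toList else st.1) ++ ['\n'], 0)
  else
    ((if st.2 < width then st.1 ++ [c] else st.1), st.2 + 1)

-- Source B: fold the step over the text from (out = [], col = 0), then the final flush after the loop.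
def wrapTruncateB (cs : List Char) (width : Int) : List Char :=
  let st := cs.foldl (wrapTruncateBStep width) ([], 0)
  if st.2 > width then st.1 ++ "...".toList else st.1

def wrap_truncate_alt (text : String) (width : Int) : String :=
  String.ofList (wrapTruncateB text.toList width)

-- ===== PRECONDITION & SPEC =====
-- For negative widths on a text containing a line longer than |width|, A's slice line[0:width]
-- keeps all but the last |width| characters before the '...' (an accident of Python negative-slice
-- semantics), while B truncates to zero kept characters and returns '...' per over-long line,
-- the intended behaviour of a truncation width clamped at 0.
def D_wrap_truncate (text : String) (width : Int) : Prop :=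
  width < 0 ∧ ∃ l ∈ List.splitOn '\n' text.toList, (l.length : Int) > -width
instance (text : String) (width : Int) : Decidable (D_wrap_truncate text width) := by
  unfold D_wrap_truncate; infer_instance

def Spec_wrap_truncate (text : String) (width : Int) (out : String) : Prop :=
  ¬ D_wrap_truncate text width → out = wrap_truncate_alt text width
instance (text : String) (width : Int) (out : String) : Decidable (Spec_wrap_truncate text width out) := by
  unfold Spec_wrap_truncate; infer_instance

def pvDiffWitness_wrap_truncate : String × Int := ("ab", -1)
def pvDiffWitnessOut_wrap_truncate : String × String := ("a...", "...")

-- ===== CLAIM (what is proved, stated in full; the proofs are below) =====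
def Claim_unchanged_wrap_truncate : Prop := ∀ (text : String) (width : Int), Dom_wrap_truncate text width → Spec_wrap_truncate text width (wrap_truncate text width)
def Claim_changed_wrap_truncate : Prop := Dom_wrap_truncate (pvDiffWitness_wrap_truncate.1) (pvDiffWitness_wrap_truncate.2) ∧ D_wrap_truncate (pvDiffWitness_wrap_truncate.1) (pvDiffWitness_wrap_truncate.2) ∧ wrap_truncate (pvDiffWitness_wrap_truncate.1) (pvDiffWitness_wrap_truncate.2) = pvDiffWitnessOut_wrap_truncate.1 ∧ wrap_truncate_alt (pvDiffWitness_wrap_truncate.1) (pvDiffWitness_wrap_truncate.2) = pvDiffWitnessOut_wrap_truncate.2 ∧ pvDiffWitnessOut_wrap_truncate.1 ≠ pvDiffWitnessOut_wrap_truncate.2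
def Claim_exact_wrap_truncate : Prop := ∀ (text : String) (width : Int), Dom_wrap_truncate text width → D_wrap_truncate text width → wrap_truncate text width ≠ wrap_truncate_alt text width

-- ===== LEMMAS AND PROOFS =====

-- Reference recursive form of str.split('\n') used to bridge A's fuel-based splitOn to B's scan.
def pvConsFirst (p : List Char) : List (List Char) → List (List Char)
  | [] => [p]
  | x :: xs => (p ++ x) :: xs

def pvSplitNl : List Char → List (List Char)
  | [] => [[]]
  | c :: rest => if c = '\n' then [] :: pvSplitNl rest else pvConsFirst [c] (pvSplitNl rest)

theorem pvSplitNl_ne_nil (cs : List Char) : pvSplitNl cs ≠ [] := by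
  cases cs with
  | nil => simp [pvSplitNl]
  | cons c rest =>
    simp only [pvSplitNl]
    split
    · simp
    · cases h : pvSplitNl rest <;> simp [pvConsFirst]

theorem pvConsFirst_nil_of_ne (xs : List (List Char)) (h : xs ≠ []) : pvConsFirst [] xs = xs := by
  cases xs with
  | nil => exact absurd rfl h
  | cons x xs => simp [pvConsFirst]

theorem pvConsFirst_consFirst (p q : List Char) (xs : List (List Char)) :
    pvConsFirst p (pvConsFirst q xs) = pvConsFirst (p ++ q) xs := by
  cases xs <;> simp [pvConsFirst]

theorem pvGo_eq (fuel : Nat) : ∀ (l cur : List Char) (acc : List (List Char)), l.length ≤ fuel →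
    PySem.Chars.splitOn.go ['\n'] fuel l cur acc = acc.reverse ++ pvConsFirst cur.reverse (pvSplitNl l) := by
  induction fuel with
  | zero =>
    intro l cur acc hl
    have : l = [] := List.eq_nil_of_length_eq_zero (Nat.le_zero.mp hl)
    subst this
    simp [PySem.Chars.splitOn.go, pvSplitNl, pvConsFirst]
  | succ fuel ih =>
    intro l cur acc hl
    cases l with
    | nil => simp [PySem.Chars.splitOn.go, pvSplitNl, pvConsFirst]
    | cons c rest =>
      simp only [PySem.Chars.splitOn.go]
      by_cases hc : c = '\n'
      · subst hc
        have hpre : ['\n'].isPrefixOf ('\n' :: rest) = true := by simp [List.isPrefixOf]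
        rw [if_pos hpre]
        simp only [List.length_cons] at hl
        rw [show List.drop (['\n'] : List Char).length ('\n' :: rest) = rest by simp]
        rw [ih rest [] (cur.reverse :: acc) (by omega)]
        simp only [List.reverse_nil, pvConsFirst_nil_of_ne _ (pvSplitNl_ne_nil rest)]
        simp [pvSplitNl, pvConsFirst]
      · have hpre : ['\n'].isPrefixOf (c :: rest) = false := by
          simp [List.isPrefixOf]
          exact fun h => (hc h.symm).elim
        rw [if_neg (by simp [hpre])]
        simp only [List.length_cons] at hl
        rw [ih rest (c :: cur) acc (by omega)]
        have : pvSplitNl (c :: rest) = pvConsFirst [c] (pvSplitNl rest) := by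
          simp [pvSplitNl, hc]
        rw [this, pvConsFirst_consFirst]
        simp

theorem pvSplitOn_eq (cs : List Char) : PySem.Chars.splitOn cs ['\n'] = pvSplitNl cs := by
  unfold PySem.Chars.splitOn
  rw [pvGo_eq (cs.length + 1) cs [] [] (by omega)]
  simp [pvConsFirst_nil_of_ne _ (pvSplitNl_ne_nil cs)]

-- pvSplitNl is Lean's List.splitOn '\n' (used by D_).
theorem pvSplitNl_eq_splitOn (cs : List Char) : pvSplitNl cs = List.splitOn '\n' cs := by
  induction cs with
  | nil => simp [pvSplitNl, List.splitOn, List.splitOnP_nil]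
  | cons c rest ih =>
    simp only [pvSplitNl, List.splitOn] at *
    rw [List.splitOnP_cons]
    by_cases hc : c = '\n'
    · simp [hc, ih]
    · rw [if_neg (by simp [hc]), ih]
      cases h : List.splitOnP (· == '\n') rest with
      | nil => exact absurd h (List.splitOnP_ne_nil _ rest)
      | cons q qs => simp [hc, pvConsFirst]

-- the per-line truncation A performs
def pvTrunc (width : Int) (line : List Char) : List Char :=
  if (PySem.Chars.len line) > width then
    PySem.Chars.slice line (some 0) (some width) ++ "...".toList
  else line

theorem pvFoldl_map (width : Int) (l : List (List Char)) : ∀ (acc : List (List Char)),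
    l.foldl (fun acc line =>
      if (PySem.Chars.len line) > width then
        acc ++ [PySem.Chars.slice line (some 0) (some width) ++ "...".toList]
      else acc ++ [line]) acc = acc ++ l.map (pvTrunc width) := by
  have hbody : (fun (acc : List (List Char)) line =>
      if (PySem.Chars.len line) > width then
        acc ++ [PySem.Chars.slice line (some 0) (some width) ++ "...".toList]
      else acc ++ [line]) = fun acc line => acc ++ [pvTrunc width line] := by
    funext acc line
    simp only [pvTrunc]
    split <;> rfl
  rw [hbody]
  induction l with
  | nil => intro acc; simp
  | cons x xs ih =>
    intro acc
    simp only [List.foldl_cons, List.map_cons]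
    rw [ih]
    simp

theorem pvA_join (cs : List Char) (width : Int) :
    wrapTruncateA cs width = PySem.Chars.join ['\n'] ((pvSplitNl cs).map (pvTrunc width)) := by
  simp only [wrapTruncateA, pvSplitOn_eq, pvFoldl_map, List.nil_append]

theorem pvSplitNl_step (cs : List Char) :
    pvSplitNl cs = cs.takeWhile (· ≠ '\n') ::
      (match cs.dropWhile (· ≠ '\n') with
       | [] => ([] : List (List Char))
       | _ :: rest => pvSplitNl rest) := by
  induction cs with
  | nil => simp [pvSplitNl]
  | cons c rest ih =>
    by_cases hc : c = '\n'
    · subst hc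
      simp [pvSplitNl]
    · simp only [pvSplitNl, if_neg hc]
      rw [ih]
      simp [pvConsFirst, hc]

-- the characters B keeps from a line when entering it at column `col`
def pvEmit (width : Int) (col : Int) : List Char → List Char
  | [] => []
  | c :: cs => (if col < width then [c] else []) ++ pvEmit width (col + 1) cs

theorem pvEmit_take (width : Int) : ∀ (l : List Char) (col : Int),
    pvEmit width col l = l.take (width - col).toNat := by
  intro l
  induction l with
  | nil => intro col; simp [pvEmit]
  | cons c cs ih =>
    intro col
    by_cases h : col < width
    · have h1 : (width - col).toNat = (width - (col + 1)).toNat + 1 := by omega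
      simp [pvEmit, h, ih, h1]
    · have h1 : (width - col).toNat = 0 := by omega
      have h2 : (width - (col + 1)).toNat = 0 := by omega
      simp [pvEmit, h, ih, h1, h2]

theorem pvEmit_all (width : Int) (l : List Char) (h : (l.length : Int) ≤ width) :
    pvEmit width 0 l = l := by
  rw [pvEmit_take]
  exact List.take_of_length_le (by omega)

-- the per-line output of B
def pvLineB (width : Int) (line : List Char) : List Char :=
  if (line.length : Int) > width then pvEmit width 0 line ++ "...".toList else line

-- dropWhile's head fails the predicate (shape-specialised)
theorem pv_dropWhile_head (p : Char → Bool) : ∀ (l : List Char) (c : Char) (cs : List Char),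
    l.dropWhile p = c :: cs → p c = false := by
  intro l
  induction l with
  | nil => intro c cs h; simp [List.dropWhile] at h
  | cons a l ih =>
    intro c cs h
    rw [List.dropWhile_cons] at h
    by_cases ha : p a
    · rw [if_pos ha] at h; exact ih c cs h
    · rw [if_neg ha] at h
      obtain ⟨rfl, -⟩ := List.cons.inj h
      simpa using ha

-- B's fold over a newline-free line from state (acc, col)
theorem pvFoldl_line (width : Int) : ∀ (line : List Char), (∀ c ∈ line, c ≠ '\n') →
    ∀ (acc : List Char) (col : Int),
    line.foldl (wrapTruncateBStep width) (acc, col) = (acc ++ pvEmit width col line, col + line.length) := by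
  intro line
  induction line with
  | nil => intro _ acc col; simp [pvEmit]
  | cons c cs ih =>
    intro h acc col
    have hc : c ≠ '\n' := h c (by simp)
    have hcs : ∀ x ∈ cs, x ≠ '\n' := fun x hx => h x (by simp [hx])
    simp only [List.foldl_cons, wrapTruncateBStep, if_neg hc]
    rw [ih hcs]
    by_cases hlt : col < width
    · simp [pvEmit, hlt]
      omega
    · simp [pvEmit, hlt]
      omega

-- B's whole scan is the '\n'-join of pvLineB over the lines
theorem pvB_join (width : Int) (cs : List Char) : ∀ (acc : List Char),
    (let st := cs.foldl (wrapTruncateBStep width) (acc, 0)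
     if st.2 > width then st.1 ++ "...".toList else st.1)
      = acc ++ PySem.Chars.join ['\n'] ((pvSplitNl cs).map (pvLineB width)) := by
  intro acc
  have hsplit : cs.takeWhile (· ≠ '\n') ++ cs.dropWhile (· ≠ '\n') = cs :=
    List.takeWhile_append_dropWhile
  have hseg : ∀ c ∈ cs.takeWhile (· ≠ '\n'), c ≠ '\n' := by
    intro c hcmem
    have := List.mem_takeWhile_imp hcmem
    simpa using this
  set seg := cs.takeWhile (· ≠ '\n') with hsegdef
  rw [pvSplitNl_step cs]
  cases hdrop : cs.dropWhile (· ≠ '\n') with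
  | nil =>
    have hcs : cs = seg := by rw [← hsplit, hdrop]; simp
    conv_lhs => rw [hcs]
    simp only [pvFoldl_line width seg hseg acc 0, List.map_cons, List.map_nil,
      PySem.Chars.join_singleton, ← hsegdef, zero_add]
    simp only [pvLineB]
    by_cases hw : (seg.length : Int) > width
    · simp [hw]
    · push_neg at hw
      simp [hw, not_lt.mpr hw, pvEmit_all width seg hw]
  | cons c rest =>
    have hc : c = '\n' := by
      have := pv_dropWhile_head (fun x => decide (x ≠ '\n')) cs c rest (by simpa using hdrop)
      simpa using this
    subst hc
    have hcs : cs = seg ++ '\n' :: rest := by rw [← hsplit, hdrop]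
    conv_lhs => rw [hcs]
    rw [List.foldl_append, pvFoldl_line width seg hseg acc 0, List.foldl_cons]
    have hstep : wrapTruncateBStep width (acc ++ pvEmit width 0 seg, 0 + (seg.length : Int)) '\n'
        = (acc ++ pvLineB width seg ++ ['\n'], 0) := by
      simp only [wrapTruncateBStep, if_pos rfl, pvLineB, zero_add]
      by_cases hw : (seg.length : Int) > width
      · simp [hw]
      · push_neg at hw
        simp [not_lt.mpr hw, hw, pvEmit_all width seg hw]
    rw [hstep]
    rw [pvB_join width rest (acc ++ pvLineB width seg ++ ['\n'])]
    obtain ⟨q, qs, hq⟩ : ∃ q qs, pvSplitNl rest = q :: qs := by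
      cases hr : pvSplitNl rest with
      | nil => exact absurd hr (pvSplitNl_ne_nil rest)
      | cons q qs => exact ⟨q, qs, rfl⟩
    simp only [List.map_cons, hq, PySem.Chars.join_cons_cons, ← hsegdef]
    simp
termination_by cs.length
decreasing_by
  have hle := List.length_dropWhile_le (fun c => decide (c ≠ '\n')) cs
  rw [hdrop] at hle
  simp at hle
  omega

theorem pvB_eq (cs : List Char) (width : Int) :
    wrapTruncateB cs width = PySem.Chars.join ['\n'] ((pvSplitNl cs).map (pvLineB width)) := by
  have := pvB_join width cs []
  simpa [wrapTruncateB] using this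

-- per-line agreement outside D_
theorem pvLine_agree_nonneg (width : Int) (hw : 0 ≤ width) (l : List Char) :
    pvTrunc width l = pvLineB width l := by
  simp only [pvTrunc, pvLineB, PySem.Chars.len_eq, PySem.Chars.slice_eq_listSlice]
  by_cases h : (l.length : Int) > width
  · rw [if_pos h, if_pos h, pvEmit_take, PySem.List.slice_zero_start, PySem.List.slice_to l hw]
    simp
  · rw [if_neg h, if_neg h]

theorem pvLine_agree_short (width : Int) (hw : width < 0) (l : List Char)
    (hl : (l.length : Int) ≤ -width) : pvTrunc width l = pvLineB width l := by
  have hgt : (l.length : Int) > width := by omega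
  have hk : 0 < (-width).toNat := by omega
  have hwk : width = -(((-width).toNat : Nat) : Int) := by omega
  simp only [pvTrunc, pvLineB, PySem.Chars.len_eq, PySem.Chars.slice_eq_listSlice,
    if_pos hgt]
  rw [pvEmit_take]
  have h0 : (width - 0).toNat = 0 := by omega
  rw [h0, List.take_zero]
  rw [PySem.List.slice_zero_start, hwk, PySem.List.slice_to_neg_natCast _ _ hk]
  have : l.length - (-width).toNat = 0 := by omega
  simp [this]

-- lengths for the tightness proof (width < 0)
theorem pvLen_trunc_neg (width : Int) (hw : width < 0) (l : List Char) :
    (pvTrunc width l).length = (l.length - (-width).toNat) + 3 := by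
  have hgt : PySem.Chars.len l > width := by simp [PySem.Chars.len_eq]; omega
  have hk : 0 < (-width).toNat := by omega
  have hwk : width = -(((-width).toNat : Nat) : Int) := by omega
  simp only [pvTrunc, if_pos hgt, PySem.Chars.slice_eq_listSlice]
  rw [PySem.List.slice_zero_start, hwk, PySem.List.slice_to_neg_natCast _ _ hk]
  simp [List.length_take]
  omega

theorem pvLen_lineB_neg (width : Int) (hw : width < 0) (l : List Char) :
    (pvLineB width l).length = 3 := by
  have hgt : (l.length : Int) > width := by omega
  simp only [pvLineB, if_pos hgt]
  rw [pvEmit_take]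
  have h0 : (width - 0).toNat = 0 := by omega
  rw [h0, List.take_zero]
  rfl

-- generic join-length comparison
theorem pvJoin_len_le (f g : List Char → List Char) : ∀ (ls : List (List Char)),
    (∀ l ∈ ls, (g l).length ≤ (f l).length) →
    (PySem.Chars.join ['\n'] (ls.map g)).length ≤ (PySem.Chars.join ['\n'] (ls.map f)).length := by
  intro ls
  induction ls with
  | nil => intro _; simp
  | cons a t ih =>
    intro h
    have ha := h a (by simp)
    have ht : ∀ l ∈ t, (g l).length ≤ (f l).length := fun l hl => h l (by simp [hl])
    cases t with
    | nil => simpa [PySem.Chars.join_singleton] using ha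
    | cons b t' =>
      simp only [List.map_cons, PySem.Chars.join_cons_cons]
      have := ih ht
      simp only [List.map_cons] at this
      simp only [List.length_append]
      omega

theorem pvJoin_len_lt (f g : List Char → List Char) : ∀ (ls : List (List Char)),
    (∀ l ∈ ls, (g l).length ≤ (f l).length) →
    (∃ l ∈ ls, (g l).length < (f l).length) →
    (PySem.Chars.join ['\n'] (ls.map g)).length < (PySem.Chars.join ['\n'] (ls.map f)).length := by
  intro ls
  induction ls with
  | nil => intro _ h; simp at h
  | cons a t ih =>
    intro hle hex
    have ha := hle a (by simp)
    have ht : ∀ l ∈ t, (g l).length ≤ (f l).length := fun l hl => hle l (by simp [hl])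
    cases t with
    | nil =>
      obtain ⟨l, hl, hlt⟩ := hex
      simp at hl
      subst hl
      simpa [PySem.Chars.join_singleton] using hlt
    | cons b t' =>
      simp only [List.map_cons, PySem.Chars.join_cons_cons]
      simp only [List.length_append]
      obtain ⟨l, hl, hlt⟩ := hex
      rcases List.mem_cons.mp hl with rfl | hl'
      · have := pvJoin_len_le f g (b :: t') ht
        simp only [List.map_cons] at this
        omega
      · have := ih ht ⟨l, hl', hlt⟩
        simp only [List.map_cons] at this
        omega

-- ===== VERDICT (by name: the statements are the Claim_ definitions above) =====
theorem wrap_truncate_spec : Claim_unchanged_wrap_truncate := by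
  intro text width _ hnd
  unfold wrap_truncate wrap_truncate_alt
  rw [pvA_join, pvB_eq]
  congr 2
  apply List.map_congr_left
  intro l hl
  by_cases hw : 0 ≤ width
  · exact pvLine_agree_nonneg width hw l
  · push_neg at hw
    apply pvLine_agree_short width hw l
    by_contra hlong
    push_neg at hlong
    exact hnd ⟨hw, l, by rwa [← pvSplitNl_eq_splitOn], hlong⟩

theorem wrap_truncate_changed : Claim_changed_wrap_truncate := by
  unfold Claim_changed_wrap_truncate; decide

theorem wrap_truncate_tight : Claim_exact_wrap_truncate := by
  intro text width _ hD heq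
  obtain ⟨hw, l, hl, hlong⟩ := hD
  rw [← pvSplitNl_eq_splitOn] at hl
  have hlen : (wrap_truncate_alt text width).toList.length < (wrap_truncate text width).toList.length := by
    unfold wrap_truncate wrap_truncate_alt
    rw [String.toList_ofList, String.toList_ofList, pvA_join, pvB_eq]
    apply pvJoin_len_lt (pvTrunc width) (pvLineB width)
    · intro x _
      rw [pvLen_trunc_neg width hw x, pvLen_lineB_neg width hw x]
      omega
    · refine ⟨l, hl, ?_⟩
      rw [pvLen_trunc_neg width hw l, pvLen_lineB_neg width hw l]
      omega
  rw [heq] at hlen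
  omega
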